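-- pv_equiv track=rewrite | github.com/BernardoSiqueiraBatista/ModoEstudanteDev | apps/HipocratesAi-BackEnd/python_services/clinical_llm/app/pipeline/quality_worker.py | gaps_summary
-- ===== SOURCE A (Python) =====
-- from typing import Any, Dict, List, Optional, Tuple
--
-- def gaps_summary(extracted: Dict[str, Any]) -> Tuple[str, List[Dict[str, Any]]]:
--     gaps = extracted.get("gaps") or []
--     highs = [g for g in gaps if g.get("severity") == "high"]
--     meds = [g for g in gaps if g.get("severity") == "medium"]
--     lows = [g for g in gaps if g.get("severity") == "low"]
--
--     if highs:
--         return "críticas", highs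
--     if meds or lows:
--         return "leves", meds + lows
--     return "nenhuma", []
-- ===== SOURCE B (Python) =====
-- RANK = {"high": 0, "medium": 1, "low": 2}
--
-- def gaps_summary(extracted):
--     gaps = extracted.get("gaps") or []
--     ranked = sorted(
--         [(RANK[g.get("severity")], g) for g in gaps if g.get("severity") in RANK],
--         key=lambda p: p[0],
--     )
--     if not ranked:
--         return "nenhuma", []
--     if ranked[0][0] == 0:
--         return "críticas", [g for r, g in ranked if r == 0]
--     return "leves", [g for _, g in ranked]
-- ===== Notes on version B (the rewrite author's own statement) =====
-- stated objective: alternative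
-- what changed: B maps each gap to a numeric severity rank, stable-sorts the ranked gaps once, and reads the answer off the sorted list (the head rank picks the label; the result is the rank-0 group or the whole sorted list), instead of A's three filter passes plus priority branches.
import Mathlib
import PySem

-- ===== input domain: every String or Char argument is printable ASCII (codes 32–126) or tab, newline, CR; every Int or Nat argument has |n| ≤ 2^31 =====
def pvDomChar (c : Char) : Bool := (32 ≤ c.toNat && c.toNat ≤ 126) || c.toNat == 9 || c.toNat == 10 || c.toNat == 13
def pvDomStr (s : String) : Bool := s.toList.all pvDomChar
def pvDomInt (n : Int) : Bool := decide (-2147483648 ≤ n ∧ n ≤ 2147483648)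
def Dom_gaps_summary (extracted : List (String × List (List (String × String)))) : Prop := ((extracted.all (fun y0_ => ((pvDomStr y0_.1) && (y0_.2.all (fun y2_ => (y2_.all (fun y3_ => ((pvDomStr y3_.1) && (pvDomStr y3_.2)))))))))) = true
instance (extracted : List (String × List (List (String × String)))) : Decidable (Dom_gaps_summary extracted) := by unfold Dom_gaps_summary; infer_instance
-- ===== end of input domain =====

-- B ranks each gap numerically, stable-sorts the ranked gaps once and reads label
-- and list off the sorted result (alternative algorithm, same observable value).


-- ===== PORT A =====
-- extracted.get("gaps") or []  (a missing key and an empty list both give [])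
def pvGapsOf (extracted : List (String × List (List (String × String)))) :
    List (List (String × String)) :=
  match (PySem.Dict.mk extracted).get? "gaps" with
  | none => []
  | some l => if l.isEmpty then [] else l

def gaps_summary (extracted : List (String × List (List (String × String)))) : String × (List (List (String × String))) :=
  let gaps := pvGapsOf extracted
  let highs := gaps.filter (fun g => (PySem.Dict.mk g).get? "severity" == some "high")
  let meds := gaps.filter (fun g => (PySem.Dict.mk g).get? "severity" == some "medium")
  let lows := gaps.filter (fun g => (PySem.Dict.mk g).get? "severity" == some "low")
  if !highs.isEmpty then ("críticas", highs)
  else if !meds.isEmpty || !lows.isEmpty then ("leves", meds ++ lows)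
  else ("nenhuma", [])

-- ===== PORT B =====
-- RANK[g.get("severity")] together with the membership test `in RANK`
def pvRank? (g : List (String × String)) : Option Int :=
  let sev := (PySem.Dict.mk g).get? "severity"
  if sev == some "high" then some 0
  else if sev == some "medium" then some 1
  else if sev == some "low" then some 2
  else none

def gaps_summary_alt (extracted : List (String × List (List (String × String)))) : String × (List (List (String × String))) :=
  let gaps := pvGapsOf extracted
  let ranked := PySem.List.sorted
    (gaps.filterMap (fun g => (pvRank? g).map (fun r => (r, g)))) (fun p => p.1)
  match ranked with
  | [] => ("nenhuma", [])
  | p :: _ =>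
    if p.1 == 0 then
      ("críticas", (ranked.filter (fun q => q.1 == (0 : Int))).map (fun q => q.2))
    else ("leves", ranked.map (fun q => q.2))

-- ===== PRECONDITION & SPEC =====
def Spec_gaps_summary (extracted : List (String × List (List (String × String)))) (out : String × (List (List (String × String)))) : Prop := out = gaps_summary_alt extracted
instance (extracted : List (String × List (List (String × String)))) (out : String × (List (List (String × String)))) : Decidable (Spec_gaps_summary extracted out) := by unfold Spec_gaps_summary; infer_instance

-- ===== CLAIM =====
def Claim_equal_gaps_summary : Prop := ∀ (extracted : List (String × List (List (String × String)))), Dom_gaps_summary extracted → Spec_gaps_summary extracted (gaps_summary extracted)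

-- ===== LEMMAS AND PROOFS =====
-- G abbreviates the gap record type in the lemmas below.

-- insertBy skips a prefix it does not go before
theorem insertBy_skip {α : Type} (before : α → α → Bool) (x : α) (u v : List α)
    (h : ∀ y ∈ u, before x y = false) :
    PySem.List.insertBy before x (u ++ v) = u ++ PySem.List.insertBy before x v := by
  induction u with
  | nil => simp
  | cons a u ih =>
    simp only [List.cons_append, PySem.List.insertBy, h a (by simp)]
    simp only [ih (fun y hy => h y (by simp [hy]))]
    rfl

-- insertBy puts x in front if it goes before everything
theorem insertBy_front {α : Type} (before : α → α → Bool) (x : α) (v : List α)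
    (h : ∀ y ∈ v, before x y = true) :
    PySem.List.insertBy before x v = x :: v := by
  cases v with
  | nil => rfl
  | cons a v => simp [PySem.List.insertBy, h a (by simp)]

-- insertBy appends x if it goes before nothing
theorem insertBy_end {α : Type} (before : α → α → Bool) (x : α) (v : List α)
    (h : ∀ y ∈ v, before x y = false) :
    PySem.List.insertBy before x v = v ++ [x] := by
  have := insertBy_skip before x v [] h
  simpa using this

-- the stable insertion-sort fold groups three-valued ranks into the three filters
theorem fold_ins_partition (ps a0 a1 a2 : List (Int × List (String × String)))
    (h0 : ∀ x ∈ a0, x.1 = 0) (h1 : ∀ x ∈ a1, x.1 = 1) (h2 : ∀ x ∈ a2, x.1 = 2)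
    (hps : ∀ p ∈ ps, p.1 = 0 ∨ p.1 = 1 ∨ p.1 = 2) :
    List.foldl (fun acc x => PySem.List.insertBy (fun a b => decide (a.1 < b.1)) x acc)
      (a0 ++ a1 ++ a2) ps =
    (a0 ++ ps.filter (fun p => p.1 == (0:Int))) ++ (a1 ++ ps.filter (fun p => p.1 == (1:Int)))
      ++ (a2 ++ ps.filter (fun p => p.1 == (2:Int))) := by
  induction ps generalizing a0 a1 a2 with
  | nil => simp
  | cons p ps ih =>
    have hp := hps p (by simp)
    rw [List.foldl_cons]
    rcases hp with hp | hp | hp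
    · have : PySem.List.insertBy (fun a b => decide (a.1 < b.1)) p (a0 ++ a1 ++ a2)
          = (a0 ++ [p]) ++ a1 ++ a2 := by
        rw [List.append_assoc, insertBy_skip _ _ a0 _
          (fun y hy => by simp [h0 y hy, hp]),
          insertBy_front _ _ _ (fun y hy => by
            rcases List.mem_append.1 hy with h | h
            · simp [h1 y h, hp]
            · simp [h2 y h, hp])]
        simp
      rw [this, ih (a0 ++ [p]) a1 a2
        (fun x hx => by rcases List.mem_append.1 hx with h | h
                        · exact h0 x h
                        · simp at h; simp [h, hp]) h1 h2
        (fun q hq => hps q (by simp [hq]))]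
      simp [hp]
    · have : PySem.List.insertBy (fun a b => decide (a.1 < b.1)) p (a0 ++ a1 ++ a2)
          = a0 ++ (a1 ++ [p]) ++ a2 := by
        rw [List.append_assoc, insertBy_skip _ _ a0 _
          (fun y hy => by simp [h0 y hy, hp]),
          insertBy_skip _ _ a1 _ (fun y hy => by simp [h1 y hy, hp]),
          insertBy_front _ _ _ (fun y hy => by simp [h2 y hy, hp])]
        simp
      rw [this, ih a0 (a1 ++ [p]) a2 h0
        (fun x hx => by rcases List.mem_append.1 hx with h | h
                        · exact h1 x h
                        · simp at h; simp [h, hp]) h2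
        (fun q hq => hps q (by simp [hq]))]
      simp [hp]
    · have : PySem.List.insertBy (fun a b => decide (a.1 < b.1)) p (a0 ++ a1 ++ a2)
          = a0 ++ a1 ++ (a2 ++ [p]) := by
        rw [List.append_assoc, insertBy_skip _ _ a0 _
          (fun y hy => by simp [h0 y hy, hp]),
          insertBy_skip _ _ a1 _ (fun y hy => by simp [h1 y hy, hp]),
          insertBy_end _ _ a2 (fun y hy => by simp [h2 y hy, hp])]
        simp
      rw [this, ih a0 a1 (a2 ++ [p]) h0 h1
        (fun x hx => by rcases List.mem_append.1 hx with h | h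
                        · exact h2 x h
                        · simp at h; simp [h, hp])
        (fun q hq => hps q (by simp [hq]))]
      simp [hp]

-- the ranked-and-filtered list at rank r is the severity filter, tagged
theorem filterMap_rank_filter (gaps : List (List (String × String))) (r : Int) (s : String)
    (hr : ∀ g, pvRank? g = some r ↔ (PySem.Dict.mk g).get? "severity" = some s) :
    ((gaps.filterMap (fun g => (pvRank? g).map (fun x => (x, g)))).filter
        (fun p => p.1 == r)) =
      (gaps.filter (fun g => (PySem.Dict.mk g).get? "severity" == some s)).map
        (fun g => (r, g)) := by
  induction gaps with
  | nil => rfl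
  | cons g gaps ih =>
    simp only [List.filterMap_cons, List.filter_cons]
    cases hk : pvRank? g with
    | none =>
      have : ¬ (PySem.Dict.mk g).get? "severity" = some s := by
        intro h; have := (hr g).2 h; simp [hk] at this
      simp [this, ih]
    | some k =>
      by_cases hkr : k = r
      · subst hkr
        have hs := (hr g).1 hk
        simp [hs, ih]
      · have : ¬ (PySem.Dict.mk g).get? "severity" = some s := by
          intro h; have := (hr g).2 h; rw [hk] at this
          exact hkr (by injection this)
        simp [this, hkr, ih]

theorem rank_high (g : List (String × String)) :
    pvRank? g = some 0 ↔ (PySem.Dict.mk g).get? "severity" = some "high" := by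
  simp only [pvRank?]
  split_ifs with h1 h2 h3 <;> simp_all

theorem rank_medium (g : List (String × String)) :
    pvRank? g = some 1 ↔ (PySem.Dict.mk g).get? "severity" = some "medium" := by
  simp only [pvRank?]
  split_ifs with h1 h2 h3 <;> simp_all

theorem rank_low (g : List (String × String)) :
    pvRank? g = some 2 ↔ (PySem.Dict.mk g).get? "severity" = some "low" := by
  simp only [pvRank?]
  split_ifs with h1 h2 h3 <;> simp_all

theorem ranked_structure (gaps : List (List (String × String))) :
    PySem.List.sorted
      (gaps.filterMap (fun g => (pvRank? g).map (fun r => (r, g)))) (fun p => p.1) =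
    (gaps.filter (fun g => (PySem.Dict.mk g).get? "severity" == some "high")).map (fun g => ((0:Int), g))
      ++ (gaps.filter (fun g => (PySem.Dict.mk g).get? "severity" == some "medium")).map (fun g => ((1:Int), g))
      ++ (gaps.filter (fun g => (PySem.Dict.mk g).get? "severity" == some "low")).map (fun g => ((2:Int), g)) := by
  rw [PySem.List.sorted_eq_foldl_insertBy]
  have hvals : ∀ p ∈ gaps.filterMap (fun g => (pvRank? g).map (fun r => (r, g))),
      p.1 = 0 ∨ p.1 = 1 ∨ p.1 = 2 := by
    intro p hp
    rcases List.mem_filterMap.1 hp with ⟨g, _, hg⟩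
    cases hk : pvRank? g with
    | none => rw [hk] at hg; simp at hg
    | some k =>
      rw [hk] at hg
      simp at hg
      have : p.1 = k := by rw [← hg]
      rw [this]
      revert hk
      simp only [pvRank?]
      split_ifs <;> intro h <;> simp_all
  have := fold_ins_partition (gaps.filterMap (fun g => (pvRank? g).map (fun r => (r, g))))
    [] [] [] (by simp) (by simp) (by simp) hvals
  simp only [List.nil_append] at this
  rw [this,
    filterMap_rank_filter gaps 0 "high" rank_high,
    filterMap_rank_filter gaps 1 "medium" rank_medium,
    filterMap_rank_filter gaps 2 "low" rank_low]

theorem gaps_summary_eq_alt (extracted : List (String × List (List (String × String)))) :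
    gaps_summary extracted = gaps_summary_alt extracted := by
  unfold gaps_summary gaps_summary_alt
  simp only [ranked_structure]
  set gaps := pvGapsOf extracted
  set H := gaps.filter (fun g => (PySem.Dict.mk g).get? "severity" == some "high") with hH
  set M := gaps.filter (fun g => (PySem.Dict.mk g).get? "severity" == some "medium") with hM
  set L := gaps.filter (fun g => (PySem.Dict.mk g).get? "severity" == some "low") with hL
  cases H with
  | cons h hs =>
    simp [List.filter_append, List.filter_map, Function.comp_def]
  | nil =>
    cases M with
    | cons m ms => simp
    | nil =>
      cases L with
      | cons l ls => simp
      | nil => simp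

-- ===== VERDICT =====
theorem gaps_summary_spec : Claim_equal_gaps_summary := by
  intro extracted _
  show gaps_summary extracted = gaps_summary_alt extracted
  exact gaps_summary_eq_alt extracted
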